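-- pv_equiv track=rewrite | github.com/Jodast11/AdventOfCode | python/2015/day11/solution2.py | skipUnwanted
-- ===== SOURCE A (Python) =====
-- def increment(passwordIntInput):
--     passwordInt = passwordIntInput.copy()[::-1]
--     newPasswordInt = []
--     if passwordInt[0] == 25:
--         newPasswordInt.append(0)
--         for newLetterInt in increment(passwordInt[1:][::-1])[::-1]:
--             newPasswordInt.append(newLetterInt)
--     else:
--         newPasswordInt.append(passwordInt[0]+1)
--         for newLetterInt in passwordInt[1:]:
--             newPasswordInt.append(newLetterInt)
--     return newPasswordInt[::-1]
--
-- def skipUnwanted(passwordInt):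
--     invalidInts = [8,14,11]
--     result = []
--     for i, integer in enumerate(passwordInt):
--         if integer in invalidInts:
--             result.append(increment([integer])[0])
--             for j in range(len(passwordInt)-i-1):
--                 result.append(0)
--             break
--         else:
--             result.append(integer)
--     return result
-- ===== SOURCE B (Python) =====
-- def skipUnwanted(passwordInt):
--     # Right-to-left pass: fold over the reversed list, keeping the processed
--     # suffix (in reversed order). Hitting an invalid element wipes everything
--     # accumulated so far to zeros and records the bumped pivot; the leftmost
--     # invalid element therefore wins automatically, with no break, no index
--     # and no search for the pivot.
--     acc = []
--     for x in reversed(passwordInt):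
--         if x in (8, 11, 14):
--             acc = [0] * len(acc)
--             acc.append(x + 1)
--         else:
--             acc.append(x)
--     return acc[::-1]
-- ===== Notes on version B (the rewrite author's own statement) =====
-- stated objective: alternative
-- what changed: Replaces A's left-to-right scan-with-break (append accumulator, nested zero-fill loop, recursive increment helper) by a single right-to-left fold that builds the output back-to-front: each invalid element wipes the accumulated suffix to zeros, so the leftmost invalid wins without any break, index arithmetic or pivot search.
import Mathlib
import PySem

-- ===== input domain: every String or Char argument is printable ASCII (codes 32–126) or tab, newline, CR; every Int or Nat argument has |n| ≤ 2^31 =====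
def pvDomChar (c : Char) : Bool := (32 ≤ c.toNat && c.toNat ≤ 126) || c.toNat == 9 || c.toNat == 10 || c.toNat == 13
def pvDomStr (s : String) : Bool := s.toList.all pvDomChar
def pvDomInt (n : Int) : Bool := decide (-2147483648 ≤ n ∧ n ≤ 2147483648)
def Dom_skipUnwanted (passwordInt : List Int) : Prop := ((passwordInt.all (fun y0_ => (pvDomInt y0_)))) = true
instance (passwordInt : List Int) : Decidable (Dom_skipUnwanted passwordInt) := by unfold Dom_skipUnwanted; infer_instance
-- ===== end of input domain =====

-- B replaces A's left-to-right scan-with-break (append accumulator, nested zero-fill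
-- loop, recursive increment helper) by a right-to-left fold building the output
-- back-to-front, where an invalid element wipes the accumulated suffix to zeros
-- (objective: alternative).


-- ===== PORT A =====
-- increment(passwordIntInput): reverse, bump/carry on the head, reverse back.
-- Python raises IndexError on []; skipUnwanted only calls it on singletons, so the [] arm is unreachable there.
def incrementA (input : List Int) : List Int :=
  match h : input.reverse with
  | [] => []
  | x :: rest =>
    if x = 25 then
      (0 :: (incrementA rest.reverse).reverse).reverse
    else
      ((x + 1) :: rest).reverse
termination_by input.length
decreasing_by
  have hlen : input.length = rest.length + 1 := by
    have := congrArg List.length h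
    simpa using this
  simp [hlen]

-- the enumerate loop of skipUnwanted: i is the enumerate index, rest the remaining items,
-- result the accumulator; on an invalid element append increment([integer])[0], then the
-- zero-fill inner loop (range(len(passwordInt)-i-1)) and break.
def skipLoopA (P : List Int) : Nat → List Int → List Int → List Int
  | _, [], result => result
  | i, integer :: rest, result =>
    if integer = 8 ∨ integer = 14 ∨ integer = 11 then
      (List.range (P.length - i - 1)).foldl (fun r _ => r ++ [0])
        (result ++ [(incrementA [integer]).headD 0])
    else skipLoopA P (i + 1) rest (result ++ [integer])

def skipUnwanted (passwordInt : List Int) : List Int :=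
  skipLoopA passwordInt 0 passwordInt []

-- ===== PORT B =====
-- loop body of Source B: acc holds the processed suffix in reversed order
def altStep (acc : List Int) (x : Int) : List Int :=
  if x = 8 ∨ x = 11 ∨ x = 14 then (List.replicate acc.length 0) ++ [x + 1]
  else acc ++ [x]

def skipUnwanted_alt (passwordInt : List Int) : List Int :=
  (passwordInt.reverse.foldl altStep []).reverse

-- ===== PRECONDITION & SPEC =====
def Spec_skipUnwanted (passwordInt : List Int) (out : List Int) : Prop := out = skipUnwanted_alt passwordInt
instance (passwordInt : List Int) (out : List Int) : Decidable (Spec_skipUnwanted passwordInt out) := by unfold Spec_skipUnwanted; infer_instance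

-- ===== CLAIM (what is proved, stated in full; the proofs are below) =====
def Claim_equal_skipUnwanted : Prop := ∀ (passwordInt : List Int), Dom_skipUnwanted passwordInt → Spec_skipUnwanted passwordInt (skipUnwanted passwordInt)

-- ===== LEMMAS AND PROOFS =====

-- common reference function used to relate the two ports
def goSpec : List Int → List Int
  | [] => []
  | x :: rest =>
    if x = 8 ∨ x = 14 ∨ x = 11 then (x + 1) :: List.replicate rest.length 0
    else x :: goSpec rest

lemma goSpec_length : ∀ p : List Int, (goSpec p).length = p.length := by
  intro p
  induction p with
  | nil => simp [goSpec]
  | cons x t ih => by_cases hx : x = 8 ∨ x = 14 ∨ x = 11 <;> simp [goSpec, hx, ih]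

lemma range_fold_zeros (n : Nat) (acc : List Int) :
    (List.range n).foldl (fun r _ => r ++ [0]) acc = acc ++ List.replicate n 0 := by
  induction n generalizing acc with
  | zero => simp
  | succ k ih =>
      rw [List.range_succ, List.foldl_append, ih]
      simp [List.replicate_succ']

lemma incrementA_singleton (x : Int) (hx : x ≠ 25) : incrementA [x] = [x + 1] := by
  rw [incrementA]
  split
  · next h => simp at h
  · next x1 rest h =>
      simp only [List.reverse_singleton, List.cons.injEq] at h
      obtain ⟨rfl, rfl⟩ := h
      simp [hx]

lemma skipLoopA_go (P : List Int) :
    ∀ (rest : List Int) (i : Nat) (acc : List Int), i + rest.length = P.length →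
      skipLoopA P i rest acc = acc ++ goSpec rest := by
  intro rest
  induction rest with
  | nil => intro i acc _; simp [skipLoopA, goSpec]
  | cons x t ih =>
      intro i acc hlen
      by_cases hx : x = 8 ∨ x = 14 ∨ x = 11
      · have hx25 : x ≠ 25 := by rcases hx with h | h | h <;> simp [h]
        have hcount : P.length - i - 1 = t.length := by
          simp at hlen; omega
        simp only [skipLoopA, if_pos hx, goSpec, hcount,
          range_fold_zeros, incrementA_singleton x hx25]
        simp
      · simp only [skipLoopA, if_neg hx, goSpec]
        rw [ih (i + 1) (acc ++ [x]) (by simp at hlen ⊢; omega)]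
        simp

lemma alt_fold_go : ∀ p : List Int, p.reverse.foldl altStep [] = (goSpec p).reverse := by
  intro p
  induction p with
  | nil => simp [goSpec]
  | cons x t ih =>
      have : (x :: t).reverse = t.reverse ++ [x] := by simp
      rw [this, List.foldl_append, ih]
      by_cases hx : x = 8 ∨ x = 14 ∨ x = 11
      · have hx' : x = 8 ∨ x = 11 ∨ x = 14 := by tauto
        simp [altStep, hx', goSpec, hx, goSpec_length, List.reverse_cons]
      · have hx' : ¬ (x = 8 ∨ x = 11 ∨ x = 14) := by tauto
        simp [altStep, hx', goSpec, hx]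

lemma alt_go : ∀ p : List Int, skipUnwanted_alt p = goSpec p := by
  intro p
  rw [skipUnwanted_alt, alt_fold_go]
  simp

-- ===== VERDICT (by name: the statement is the Claim_ definition above) =====
theorem skipUnwanted_spec : Claim_equal_skipUnwanted := by
  intro p _
  unfold Spec_skipUnwanted skipUnwanted
  rw [skipLoopA_go p p 0 [] (by simp), alt_go]
  simp
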